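-- pv_equiv track=rewrite | github.com/aaryan-arctan/fast-vc-service | src/fast_vc_service/tools/timeline_analyzer.py | _calculate_max_consecutive_delays
-- ===== SOURCE A (Python) =====
-- def _calculate_max_consecutive_delays(send_delays, threshold_ms=5):
--     """计算连续延迟的最大长度"""
--     consecutive_delays = 0
--     max_consecutive = 0
--     for delay in send_delays:
--         if delay > threshold_ms:
--             consecutive_delays += 1
--             max_consecutive = max(max_consecutive, consecutive_delays)
--         else:
--             consecutive_delays = 0
--     return max_consecutive
-- ===== SOURCE B (Python) =====
-- def _calculate_max_consecutive_delays(send_delays, threshold_ms=5):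
--     """Run-length encode by the boolean key (delay > threshold), then take the max
--     length among the above-threshold runs (0 if there are none)."""
--     runs = []  # list of [key, run_length]
--     for delay in send_delays:
--         key = delay > threshold_ms
--         if runs and runs[-1][0] == key:
--             runs[-1][1] += 1
--         else:
--             runs.append([key, 1])
--     return max((n for k, n in runs if k), default=0)
-- ===== Notes on version B (the rewrite author's own statement) =====
-- stated objective: alternative
-- what changed: Replaces the running counter/reset state machine with a group-then-reduce decomposition: first run-length-encode the list by the key (delay > threshold_ms), then return the maximum length among the True-key runs with default 0.
import Mathlib
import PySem

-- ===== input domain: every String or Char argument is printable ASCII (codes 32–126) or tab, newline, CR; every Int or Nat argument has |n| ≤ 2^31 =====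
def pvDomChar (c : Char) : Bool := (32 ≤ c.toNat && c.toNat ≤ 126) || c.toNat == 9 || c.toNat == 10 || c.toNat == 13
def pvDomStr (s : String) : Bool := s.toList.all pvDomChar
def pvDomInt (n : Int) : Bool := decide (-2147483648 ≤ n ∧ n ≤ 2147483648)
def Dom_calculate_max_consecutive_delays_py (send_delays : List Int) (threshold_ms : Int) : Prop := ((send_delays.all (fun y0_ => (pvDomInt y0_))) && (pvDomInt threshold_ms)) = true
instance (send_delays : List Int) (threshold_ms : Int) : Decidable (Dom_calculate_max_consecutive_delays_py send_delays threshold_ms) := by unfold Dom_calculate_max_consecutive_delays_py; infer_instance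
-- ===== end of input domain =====

-- B replaces A's running counter/reset state machine by a run-length-encode-then-max decomposition (alternative, same cost).


-- ===== PORT A =====
-- the for-loop over send_delays with state (consecutive_delays, max_consecutive)
def pvLoopA (t : Int) : List Int → Int → Int → Int
  | [], _, m => m
  | d :: ds, c, m => if d > t then pvLoopA t ds (c + 1) (max m (c + 1)) else pvLoopA t ds 0 m

def calculate_max_consecutive_delays_py (send_delays : List Int) (threshold_ms : Int) : Int :=
  pvLoopA threshold_ms send_delays 0 0

-- ===== PORT B =====
-- one step of B's run-building loop: increment the last run's count if its key matches, else append [key, 1]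
def pvAddRun (t : Int) (rs : List (Bool × Int)) (d : Int) : List (Bool × Int) :=
  let k := decide (d > t)
  match rs.getLast? with
  | some (b, n) => if b = k then rs.dropLast ++ [(b, n + 1)] else rs ++ [(k, 1)]
  | none => [(k, 1)]

def calculate_max_consecutive_delays_py_alt (send_delays : List Int) (threshold_ms : Int) : Int :=
  let rs := send_delays.foldl (pvAddRun threshold_ms) []
  -- max((n for k, n in runs if k), default=0)
  rs.foldl (fun acc p => if p.1 then max acc p.2 else acc) 0

-- ===== PRECONDITION & SPEC =====
def Spec_calculate_max_consecutive_delays_py (send_delays : List Int) (threshold_ms : Int) (out : Int) : Prop := out = calculate_max_consecutive_delays_py_alt send_delays threshold_ms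
instance (send_delays : List Int) (threshold_ms : Int) (out : Int) : Decidable (Spec_calculate_max_consecutive_delays_py send_delays threshold_ms out) := by unfold Spec_calculate_max_consecutive_delays_py; infer_instance

-- ===== CLAIM (what is proved, stated in full; the proofs are below) =====
def Claim_equal_calculate_max_consecutive_delays_py : Prop := ∀ (send_delays : List Int) (threshold_ms : Int), Dom_calculate_max_consecutive_delays_py send_delays threshold_ms → Spec_calculate_max_consecutive_delays_py send_delays threshold_ms (calculate_max_consecutive_delays_py send_delays threshold_ms)

-- ===== LEMMAS AND PROOFS =====

-- merge a run (b, n) onto the front of a run list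
def pvMergeH (p : Bool × Int) (rs : List (Bool × Int)) : List (Bool × Int) :=
  match rs with
  | [] => [p]
  | (b, n) :: rest => if p.1 = b then (b, p.2 + n) :: rest else p :: (b, n) :: rest

-- right-recursion characterisation of B's run list
def pvRunsR (t : Int) : List Int → List (Bool × Int)
  | [] => []
  | d :: ds => pvMergeH (decide (d > t), 1) (pvRunsR t ds)

-- length of the initial above-threshold run
def pvP (t : Int) : List Int → Int
  | [] => 0
  | d :: ds => if d > t then 1 + pvP t ds else 0

-- max length of a true-keyed run (right fold form)
def pvMT : List (Bool × Int) → Int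
  | [] => 0
  | (b, n) :: rs => if b then max n (pvMT rs) else pvMT rs

theorem pvMergeH_same (b : Bool) (n : Int) (rs : List (Bool × Int)) :
    pvMergeH (b, n) (pvMergeH (b, 1) rs) = pvMergeH (b, n + 1) rs := by
  cases rs with
  | nil => simp [pvMergeH]
  | cons p rest =>
    obtain ⟨b', m⟩ := p
    by_cases h : b = b' <;> simp [pvMergeH, h] <;> ring

theorem pvMergeH_ne (b k : Bool) (n : Int) (rs : List (Bool × Int)) (h : b ≠ k) :
    pvMergeH (b, n) (pvMergeH (k, 1) rs) = (b, n) :: pvMergeH (k, 1) rs := by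
  cases rs with
  | nil => simp [pvMergeH, h]
  | cons p rest =>
    obtain ⟨b', m⟩ := p
    by_cases h' : k = b'
    · subst h'; simp [pvMergeH, h]
    · simp [pvMergeH, h', h]

theorem pvFoldl_addRun (t : Int) (ds : List Int) :
    ∀ (front : List (Bool × Int)) (b : Bool) (n : Int),
      List.foldl (pvAddRun t) (front ++ [(b, n)]) ds = front ++ pvMergeH (b, n) (pvRunsR t ds) := by
  induction ds with
  | nil => intro front b n; simp [pvRunsR, pvMergeH]
  | cons d ds ih =>
    intro front b n
    by_cases h : b = decide (d > t)
    · have : pvAddRun t (front ++ [(b, n)]) d = front ++ [(b, n + 1)] := by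
        simp [pvAddRun, h]
      simp only [List.foldl_cons, this, ih, pvRunsR, ← h, pvMergeH_same]
    · have : pvAddRun t (front ++ [(b, n)]) d
          = (front ++ [(b, n)]) ++ [(decide (d > t), 1)] := by
        simp [pvAddRun, h]
      rw [List.foldl_cons, this, ih, pvRunsR, pvMergeH_ne _ _ _ _ h]
      simp
theorem pvRunsF_eq (t : Int) (ds : List Int) :
    List.foldl (pvAddRun t) [] ds = pvRunsR t ds := by
  cases ds with
  | nil => rfl
  | cons d ds =>
    have h0 : pvAddRun t [] d = [] ++ [(decide (d > t), 1)] := rfl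
    rw [List.foldl_cons, h0, pvFoldl_addRun t ds [] (decide (d > t)) 1]
    rfl

theorem pvMT_nonneg (rs : List (Bool × Int)) : 0 ≤ pvMT rs := by
  induction rs with
  | nil => simp [pvMT]
  | cons p rest ih =>
    obtain ⟨b, n⟩ := p
    cases b <;> simp [pvMT] <;> omega

theorem pvFoldl_max (rs : List (Bool × Int)) :
    ∀ a : Int, 0 ≤ a →
      List.foldl (fun acc p => if p.1 then max acc p.2 else acc) a rs = max a (pvMT rs) := by
  induction rs with
  | nil => intro a ha; simp [pvMT]; omega
  | cons p rest ih =>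
    intro a ha
    obtain ⟨b, n⟩ := p
    cases b
    · simp only [List.foldl_cons, pvMT]; simpa using ih a ha
    · simp only [List.foldl_cons, pvMT]
      have := ih (max a n) (by omega)
      simp at this ⊢
      omega

theorem pvHeadKey (t : Int) (ds : List Int) : ∀ d : Int,
    ∃ n rest, pvRunsR t (d :: ds) = (decide (d > t), n) :: rest ∧ 1 ≤ n ∧
      (d > t → n = pvP t (d :: ds)) := by
  induction ds with
  | nil =>
    intro d
    refine ⟨1, [], by simp [pvRunsR, pvMergeH], le_refl 1, ?_⟩
    intro h; simp [pvP, h]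
  | cons d' ds' ih =>
    intro d
    obtain ⟨n', rest', hruns, hn', hp⟩ := ih d'
    have hstep : pvRunsR t (d :: d' :: ds')
        = pvMergeH (decide (d > t), 1) ((decide (d' > t), n') :: rest') := by
      show pvMergeH (decide (d > t), 1) (pvRunsR t (d' :: ds')) = _
      rw [hruns]
    by_cases h : d > t
    · by_cases h' : d' > t
      · refine ⟨1 + n', rest', ?_, by omega, ?_⟩
        · rw [hstep]; simp [pvMergeH, h, h']
        · intro _; rw [hp h']; simp [pvP, h]
      · refine ⟨1, (decide (d' > t), n') :: rest', ?_, le_refl 1, ?_⟩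
        · rw [hstep]; simp [pvMergeH, h, h']
        · intro _; simp [pvP, h, h']
    · by_cases h' : d' > t
      · refine ⟨1, (decide (d' > t), n') :: rest', ?_, le_refl 1, fun hd => absurd hd h⟩
        rw [hstep]; simp [pvMergeH, h, h']
      · refine ⟨1 + n', rest', ?_, by omega, fun hd => absurd hd h⟩
        rw [hstep]; simp [pvMergeH, h, h']

theorem pvP_le_MT (t : Int) (ds : List Int) : pvP t ds ≤ pvMT (pvRunsR t ds) := by
  cases ds with
  | nil => simp [pvP, pvRunsR, pvMT]
  | cons d ds =>
    obtain ⟨n, rest, hruns, hn, hp⟩ := pvHeadKey t ds d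
    by_cases hd : d > t
    · rw [hruns, pvMT]
      simp only [hd, decide_true, if_true]
      rw [← hp hd]
      exact le_max_left _ _
    · rw [hruns, pvMT]
      simp only [hd, decide_false]
      have := pvMT_nonneg rest
      simp [pvP, hd]
      omega

theorem pvMT_cons_true (t d : Int) (ds : List Int) (hd : d > t) :
    pvMT (pvRunsR t (d :: ds)) = max (1 + pvP t ds) (pvMT (pvRunsR t ds)) := by
  cases ds with
  | nil => simp [pvRunsR, pvMergeH, pvMT, pvP, hd]
  | cons d' ds' =>
    obtain ⟨n', rest', hruns, hn', hp⟩ := pvHeadKey t ds' d'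
    have hstep : pvRunsR t (d :: d' :: ds')
        = pvMergeH (decide (d > t), 1) ((decide (d' > t), n') :: rest') := by
      show pvMergeH (decide (d > t), 1) (pvRunsR t (d' :: ds')) = _
      rw [hruns]
    by_cases h' : d' > t
    · have hn : n' = pvP t (d' :: ds') := hp h'
      rw [hstep, hruns]
      simp [pvMergeH, pvMT, hd, h', ← hn]
      omega
    · rw [hstep, hruns]
      simp [pvMergeH, pvMT, pvP, hd, h']

theorem pvMT_cons_false (t d : Int) (ds : List Int) (hd : ¬ d > t) :
    pvMT (pvRunsR t (d :: ds)) = pvMT (pvRunsR t ds) := by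
  cases ds with
  | nil => simp [pvRunsR, pvMergeH, pvMT, hd]
  | cons d' ds' =>
    obtain ⟨n', rest', hruns, hn', hp⟩ := pvHeadKey t ds' d'
    have hstep : pvRunsR t (d :: d' :: ds')
        = pvMergeH (decide (d > t), 1) ((decide (d' > t), n') :: rest') := by
      show pvMergeH (decide (d > t), 1) (pvRunsR t (d' :: ds')) = _
      rw [hruns]
    by_cases h' : d' > t
    · rw [hstep, hruns]
      simp [pvMergeH, pvMT, hd, h']
    · rw [hstep, hruns]
      simp [pvMergeH, pvMT, hd, h']

theorem pvP_nonneg (t : Int) (ds : List Int) : 0 ≤ pvP t ds := by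
  induction ds with
  | nil => simp [pvP]
  | cons d ds ih => simp only [pvP]; split <;> omega

theorem pvLoopA_eq (t : Int) (ds : List Int) :
    ∀ c m : Int, 0 ≤ c → c ≤ m →
      pvLoopA t ds c m = max m (max (c + pvP t ds) (pvMT (pvRunsR t ds))) := by
  induction ds with
  | nil =>
    intro c m hc hm
    simp [pvLoopA, pvP, pvRunsR, pvMT]
    omega
  | cons d ds ih =>
    intro c m hc hm
    by_cases hd : d > t
    · have hl : pvLoopA t (d :: ds) c m = pvLoopA t ds (c + 1) (max m (c + 1)) := by
        simp [pvLoopA, hd]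
      have hP : pvP t (d :: ds) = 1 + pvP t ds := by simp [pvP, hd]
      rw [hl, ih (c + 1) (max m (c + 1)) (by omega) (by omega),
        pvMT_cons_true t d ds hd, hP]
      have h0 := pvP_nonneg t ds
      have h2 := pvMT_nonneg (pvRunsR t ds)
      omega
    · have hl : pvLoopA t (d :: ds) c m = pvLoopA t ds 0 m := by
        simp [pvLoopA, hd]
      have hP : pvP t (d :: ds) = 0 := by simp [pvP, hd]
      rw [hl, ih 0 m (le_refl 0) (by omega), pvMT_cons_false t d ds hd, hP]
      have h1 := pvP_le_MT t ds
      have h2 := pvMT_nonneg (pvRunsR t ds)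
      omega

-- ===== VERDICT (by name: the statement is the Claim_ definition above) =====
theorem calculate_max_consecutive_delays_py_spec : Claim_equal_calculate_max_consecutive_delays_py := by
  intro ds t _
  unfold Spec_calculate_max_consecutive_delays_py
  have hA : calculate_max_consecutive_delays_py ds t = pvLoopA t ds 0 0 := rfl
  have hB : calculate_max_consecutive_delays_py_alt ds t
      = List.foldl (fun acc p => if p.1 then max acc p.2 else acc) 0
          (List.foldl (pvAddRun t) [] ds) := rfl
  rw [hA, hB, pvRunsF_eq, pvFoldl_max (pvRunsR t ds) 0 (le_refl 0),
    pvLoopA_eq t ds 0 0 (le_refl 0) (le_refl 0)]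
  have h1 := pvP_le_MT t ds
  have h2 := pvMT_nonneg (pvRunsR t ds)
  omega
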